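-- pv_equiv track=rewrite | github.com/Maxrosoft/solf_exam | main.py | gamma_converter
-- ===== SOURCE A (Python) =====
-- def note_upper(mus_sign):
--     convert_dict = {"BB": "B", "B": None, None: "#", "#": "X"}
--     return convert_dict[mus_sign]
--
-- def note_lower(mus_sign):
--     convert_dict = {"X": "#", "#": None, None: "B", "B": "BB"}
--     return convert_dict[mus_sign]
--
-- def gamma_converter(gamma, upper_li, lower_li):
--     res = {}
--     counter = -1
--     for k, v in gamma.items():
--         counter += 1
--         if counter in upper_li:
--             res[k] = note_upper(v)
--             continue
--         if counter in lower_li: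
--             res[k] = note_lower(v)
--             continue
--         else:
--             res[k] = v
--
--     return res
-- ===== SOURCE B (Python) =====
-- def note_upper(mus_sign):
--     convert_dict = {"BB": "B", "B": None, None: "#", "#": "X"}
--     return convert_dict[mus_sign]
--
-- def note_lower(mus_sign):
--     convert_dict = {"X": "#", "#": None, None: "B", "B": "BB"}
--     return convert_dict[mus_sign]
--
-- def gamma_converter(gamma, upper_li, lower_li):
--     res = dict(gamma)
--     keys = list(res)
--     uppers = set(upper_li)
--     for idx in sorted(uppers | set(lower_li)):
--         if 0 <= idx < len(keys):
--             k = keys[idx]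
--             res[k] = note_upper(res[k]) if idx in uppers else note_lower(res[k])
--     return res
-- ===== Notes on version B (the rewrite author's own statement) =====
-- stated objective: alternative
-- what changed: A scans every gamma item in order and tests its index against the raw upper/lower lists; B copies the dict once and scatters note_upper/note_lower patches onto only the flagged in-range positions, taken from sorted(set(upper_li) | set(lower_li)).
import Mathlib
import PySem

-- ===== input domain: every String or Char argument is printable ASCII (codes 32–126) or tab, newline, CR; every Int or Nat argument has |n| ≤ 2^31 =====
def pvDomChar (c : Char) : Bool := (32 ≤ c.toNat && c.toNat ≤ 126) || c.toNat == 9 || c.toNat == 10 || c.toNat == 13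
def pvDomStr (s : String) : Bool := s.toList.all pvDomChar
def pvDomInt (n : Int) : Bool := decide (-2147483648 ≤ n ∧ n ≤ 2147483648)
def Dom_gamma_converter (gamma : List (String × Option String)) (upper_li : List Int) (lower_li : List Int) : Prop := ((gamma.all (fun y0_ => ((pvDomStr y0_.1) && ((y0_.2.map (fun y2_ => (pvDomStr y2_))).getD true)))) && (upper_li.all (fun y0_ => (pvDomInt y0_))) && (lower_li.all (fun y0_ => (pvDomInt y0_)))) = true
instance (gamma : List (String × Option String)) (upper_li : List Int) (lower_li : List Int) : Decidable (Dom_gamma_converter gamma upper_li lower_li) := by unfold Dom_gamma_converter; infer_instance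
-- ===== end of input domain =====

-- B replaces A's scan-every-item-and-test-membership loop by copying the dict and scattering
-- note_upper/note_lower patches onto only the flagged in-range indices (sets + sorted);
-- equivalence is proved on dicts with distinct keys and values inside the conversion tables.


-- ===== PORT A =====
-- note_upper: dict lookup; `.getD none` stands in for the KeyError branch, which Pre_ excludes
def noteUpper (mus_sign : Option String) : Option String :=
  ((PySem.Dict.ofList [(some "BB", some "B"), (some "B", none), (none, some "#"), (some "#", some "X")]).get? mus_sign).getD none

-- note_lower: dict lookup; `.getD none` stands in for the KeyError branch, which Pre_ excludes
def noteLower (mus_sign : Option String) : Option String :=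
  ((PySem.Dict.ofList [(some "X", some "#"), (some "#", none), (none, some "B"), (some "B", some "BB")]).get? mus_sign).getD none

-- literal port of A: res = {} ; counter = -1 ; one pass over gamma.items() testing counter ∈ upper_li / lower_li
def gamma_converter (gamma : List (String × Option String)) (upper_li : List Int) (lower_li : List Int) : List (String × Option String) :=
  (gamma.foldl (fun (st : PySem.Dict String (Option String) × Int) kv =>
      let counter := st.2 + 1
      if counter ∈ upper_li then (st.1.insert kv.1 (noteUpper kv.2), counter)
      else if counter ∈ lower_li then (st.1.insert kv.1 (noteLower kv.2), counter)
      else (st.1.insert kv.1 kv.2, counter))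
    (PySem.Dict.empty, -1)).1.items

-- ===== PORT B =====
-- port of B: res = dict(gamma); keys = list(res); patch only sorted(set(upper_li) | set(lower_li)) positions
def gamma_converter_alt (gamma : List (String × Option String)) (upper_li : List Int) (lower_li : List Int) : List (String × Option String) :=
  let res0 : PySem.Dict String (Option String) := PySem.Dict.ofList gamma
  let keys := res0.keys
  let uppers : PySem.Set Int := PySem.Set.ofList upper_li
  let flagged := PySem.List.sorted (PySem.Set.union uppers (PySem.Set.ofList lower_li)) (fun x => x) false
  (flagged.foldl (fun (res : PySem.Dict String (Option String)) idx =>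
      if 0 ≤ idx ∧ idx < (keys.length : Int) then
        match PySem.List.pyGet? keys idx with
        | some k => res.insert k (if idx ∈ uppers then noteUpper (res.getD k none) else noteLower (res.getD k none))
        | none => res
      else res) res0).items

-- ===== PRECONDITION & SPEC =====
-- Pre_ excludes (a) gamma values outside note_upper's / note_lower's conversion tables at a flagged
-- index, on which A raises KeyError, and (b) gamma item lists with duplicate keys, which do not
-- represent a Python dict (A's input is a dict, so its keys are distinct by construction).
def Pre_gamma_converter (gamma : List (String × Option String)) (upper_li : List Int) (lower_li : List Int) : Prop :=
  (gamma.map Prod.fst).Nodup ∧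
  ∀ p ∈ PySem.List.enumerate gamma 0,
    if p.1 ∈ upper_li then p.2.2 ∈ [some "BB", some "B", none, some "#"]
    else if p.1 ∈ lower_li then p.2.2 ∈ [some "X", some "#", none, some "B"]
    else True
instance (gamma : List (String × Option String)) (upper_li : List Int) (lower_li : List Int) : Decidable (Pre_gamma_converter gamma upper_li lower_li) := by unfold Pre_gamma_converter; infer_instance

def pvWitness_gamma_converter : (List (String × Option String)) × List Int × List Int :=
  ([("C", none), ("D", some "#"), ("E", some "B")], [0], [1])

def Spec_gamma_converter (gamma : List (String × Option String)) (upper_li : List Int) (lower_li : List Int) (out : List (String × Option String)) : Prop := out = gamma_converter_alt gamma upper_li lower_li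
instance (gamma : List (String × Option String)) (upper_li : List Int) (lower_li : List Int) (out : List (String × Option String)) : Decidable (Spec_gamma_converter gamma upper_li lower_li out) := by unfold Spec_gamma_converter; infer_instance

-- ===== CLAIM (what is proved, stated in full; the proofs are below) =====
def Claim_equal_gamma_converter : Prop := ∀ (gamma : List (String × Option String)) (upper_li : List Int) (lower_li : List Int), Dom_gamma_converter gamma upper_li lower_li → Pre_gamma_converter gamma upper_li lower_li → Spec_gamma_converter gamma upper_li lower_li (gamma_converter gamma upper_li lower_li)

-- ===== LEMMAS AND PROOFS =====

def pvVal (upper_li lower_li : List Int) (j : Int) (v : Option String) : Option String :=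
  if j ∈ upper_li then noteUpper v else if j ∈ lower_li then noteLower v else v

theorem pvA_fold (u l : List Int) (g : List (String × Option String)) :
  ∀ (d : PySem.Dict String (Option String)) (c : Int),
    (g.map Prod.fst).Nodup → (∀ kv ∈ g, d.contains kv.1 = false) →
    (g.foldl (fun (st : PySem.Dict String (Option String) × Int) kv =>
      let counter := st.2 + 1
      if counter ∈ u then (st.1.insert kv.1 (noteUpper kv.2), counter)
      else if counter ∈ l then (st.1.insert kv.1 (noteLower kv.2), counter)
      else (st.1.insert kv.1 kv.2, counter)) (d, c)).1.items
    = d.items ++ (PySem.List.enumerate g (c+1)).map (fun p => (p.2.1, pvVal u l p.1 p.2.2)) := by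
  induction g with
  | nil => intro d c _ _; simp [PySem.List.enumerate_nil]
  | cons kv rest ih =>
    intro d c hnd hf
    have hfk : d.contains kv.1 = false := hf kv (by simp)
    have hstep : (let counter := (d, c).2 + 1
      if counter ∈ u then ((d, c).1.insert kv.1 (noteUpper kv.2), counter)
      else if counter ∈ l then ((d, c).1.insert kv.1 (noteLower kv.2), counter)
      else ((d, c).1.insert kv.1 kv.2, counter)) = (d.insert kv.1 (pvVal u l (c+1) kv.2), c+1) := by
      simp only [pvVal]; split_ifs <;> rfl
    rw [List.foldl_cons, hstep, ih _ _ (by simpa using hnd.sublist (by simp))]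
    · rw [PySem.Dict.items_insert_of_not_contains _ _ hfk,
        PySem.List.enumerate_cons]
      simp
    · intro kv' h'
      rw [PySem.Dict.contains_insert]
      have hne : kv'.1 ≠ kv.1 := by
        simp only [List.map_cons, List.nodup_cons] at hnd
        intro he; exact hnd.1 (he ▸ List.mem_map_of_mem h')
      simp [hne, hf kv' (List.mem_cons_of_mem _ h')]


def pvH (uppers : List Int) (j : Int) (v : Option String) : Option String :=
  if j ∈ uppers then noteUpper v else noteLower v

theorem pvB_fold (uppers : List Int) (gamma : List (String × Option String))
    (hnd : (gamma.map Prod.fst).Nodup) :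
  ∀ (fl : List Int), fl.Nodup → ∀ (w : Fin gamma.length → Option String)
    (res : PySem.Dict String (Option String)),
    res.items = List.ofFn (fun j => (gamma[j].1, w j)) →
    (fl.foldl (fun (res : PySem.Dict String (Option String)) idx =>
      if 0 ≤ idx ∧ idx < ((gamma.map Prod.fst).length : Int) then
        match PySem.List.pyGet? (gamma.map Prod.fst) idx with
        | some k => res.insert k (if idx ∈ uppers then noteUpper (res.getD k none) else noteLower (res.getD k none))
        | none => res
      else res) res).items
    = List.ofFn (fun j => (gamma[j].1, if ((j : Nat) : Int) ∈ fl then pvH uppers ((j : Nat) : Int) (w j) else w j)) := by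
  intro fl
  induction fl with
  | nil => intro _ w res hres; simpa using hres
  | cons i t ih =>
    intro hndfl w res hres
    have hkeys : res.keys = gamma.map Prod.fst := by
      show res.items.map Prod.fst = _
      rw [hres, List.map_ofFn]
      exact List.ext_getElem (by simp) (by intro j h1 h2; simp [Function.comp])
    have hkeysnd : res.keys.Nodup := hkeys ▸ hnd
    rw [List.foldl_cons]
    by_cases hin : 0 ≤ i ∧ i < ((gamma.map Prod.fst).length : Int)
    · -- in range
      obtain ⟨n, rfl⟩ : ∃ n : Nat, i = (n : Int) := ⟨i.toNat, by omega⟩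
      have hlt : n < gamma.length := by
        have := hin.2; simp only [List.length_map] at this; exact_mod_cast this
      have hget : PySem.List.pyGet? (gamma.map Prod.fst) (n : Int) = some (gamma[n].1) := by
        rw [PySem.List.pyGet?_natCast]
        simp [hlt]
      have hmem : (gamma[n].1, w ⟨n, hlt⟩) ∈ res.items := by
        rw [hres]
        exact (List.mem_ofFn).mpr ⟨⟨n, hlt⟩, rfl⟩
      have hgetD : res.getD (gamma[n].1) none = w ⟨n, hlt⟩ :=
        PySem.Dict.getD_of_mem_items _ hmem hkeysnd none
      have hcont : res.contains (gamma[n].1) = true := by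
        rw [PySem.Dict.contains_iff_mem_keys, hkeys]
        exact List.mem_map_of_mem (List.getElem_mem hlt)
      have hitems : (res.insert (gamma[n].1) (pvH uppers (n : Int) (w ⟨n, hlt⟩))).items
          = List.ofFn (fun j => (gamma[j].1, if (j : Nat) = n then pvH uppers (n : Int) (w ⟨n, hlt⟩) else w j)) := by
        rw [PySem.Dict.items_insert_of_contains _ _ hcont, hres, List.map_ofFn]
        refine List.ext_getElem (by simp) ?_
        intro j h1 h2
        simp only [List.length_ofFn] at h1 h2
        by_cases hj : j = n
        · subst hj; simp
        · have hne : gamma[j].1 ≠ gamma[n].1 := by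
            intro he
            refine hj ?_
            have hj' : (gamma.map Prod.fst)[j]'(by simpa using h1) = (gamma.map Prod.fst)[n]'(by simpa using hlt) := by
              simpa using he
            exact (List.Nodup.getElem_inj_iff hnd).mp hj'
          simp [Function.comp, hne, hj]
      rw [if_pos hin, hget]
      simp only []
      rw [hgetD]
      have hv : (if (n : Int) ∈ uppers then noteUpper (w ⟨n, hlt⟩) else noteLower (w ⟨n, hlt⟩)) = pvH uppers (n : Int) (w ⟨n, hlt⟩) := rfl
      rw [hv, ih hndfl.of_cons _ _ hitems]
      refine congrArg List.ofFn (funext fun j => ?_)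
      have hnotmem : (n : Int) ∉ t := by simpa using (List.nodup_cons.mp hndfl).1
      by_cases hjn : (j : Nat) = n
      · have hj' : j = ⟨n, hlt⟩ := Fin.ext hjn
        subst hj'
        simp [hnotmem, List.mem_cons]
      · have hji : ((j : Nat) : Int) ≠ (n : Int) := by exact_mod_cast hjn
        by_cases hjt : ((j : Nat) : Int) ∈ t <;>
          simp [hjn, hjt, hji, List.mem_cons]
    · -- out of range
      rw [if_neg hin]
      rw [ih (List.nodup_cons.mp hndfl).2 w res hres]
      refine congrArg List.ofFn (funext fun j => ?_)
      have hji : ((j : Nat) : Int) ≠ i := by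
        have h1 : (j : Nat) < gamma.length := j.isLt
        simp only [List.length_map, not_and, not_lt] at hin
        omega
      by_cases hjt : ((j : Nat) : Int) ∈ t <;> simp [hjt, hji, List.mem_cons]

theorem pvOfList_items (g : List (String × Option String)) (h : (g.map Prod.fst).Nodup) :
    (PySem.Dict.ofList g).items = g := by
  have := PySem.Dict.items_foldl_insert_fresh g Prod.fst Prod.snd PySem.Dict.empty
    (by intro a _; simp [PySem.Dict.contains_empty]) h
  simpa [PySem.Dict.ofList, PySem.Dict.update] using this

theorem pvMain (gamma : List (String × Option String)) (u l : List Int)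
    (hnd : (gamma.map Prod.fst).Nodup) :
    gamma_converter gamma u l = gamma_converter_alt gamma u l := by
  -- A side
  have hA : gamma_converter gamma u l
      = List.ofFn (fun j : Fin gamma.length => (gamma[j].1, pvVal u l ((j : Nat) : Int) gamma[j].2)) := by
    unfold gamma_converter
    rw [pvA_fold u l gamma PySem.Dict.empty (-1) hnd (by intro kv _; simp [PySem.Dict.contains_empty])]
    have h0 : (-1 : Int) + 1 = 0 := by ring
    rw [h0]
    have hemp : (PySem.Dict.empty : PySem.Dict String (Option String)).items = [] := rfl
    rw [hemp, List.nil_append]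
    refine List.ext_getElem (by simp [PySem.List.length_enumerate]) ?_
    intro k h1 h2
    simp [PySem.List.getElem_enumerate]
  -- B side
  have hkeys : (PySem.Dict.ofList gamma).keys = gamma.map Prod.fst := by
    show (PySem.Dict.ofList gamma).items.map Prod.fst = _
    rw [pvOfList_items gamma hnd]
  have hfl : (PySem.List.sorted (PySem.Set.union (PySem.Set.ofList u) (PySem.Set.ofList l)) (fun x => x) false).Nodup :=
    ((PySem.List.sorted_perm _ _ _).nodup_iff).mpr
      (PySem.Set.nodup_union _ _ (PySem.Set.nodup_ofList u))
  have hres0 : (PySem.Dict.ofList gamma).items = List.ofFn (fun j : Fin gamma.length => (gamma[j].1, gamma[j].2)) := by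
    rw [pvOfList_items gamma hnd]
    exact (List.ofFn_getElem (xs := gamma)).symm
  have hB : gamma_converter_alt gamma u l
      = List.ofFn (fun j : Fin gamma.length => (gamma[j].1,
          if ((j : Nat) : Int) ∈ PySem.List.sorted (PySem.Set.union (PySem.Set.ofList u) (PySem.Set.ofList l)) (fun x => x) false
          then pvH (PySem.Set.ofList u) ((j : Nat) : Int) gamma[j].2 else gamma[j].2)) := by
    unfold gamma_converter_alt
    simp only [hkeys]
    exact pvB_fold (PySem.Set.ofList u) gamma hnd _ hfl _ _ hres0
  rw [hA, hB]
  refine congrArg List.ofFn (funext fun j => ?_)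
  have hmem : (((j : Nat) : Int) ∈ PySem.List.sorted (PySem.Set.union (PySem.Set.ofList u) (PySem.Set.ofList l)) (fun x => x) false)
      ↔ (((j : Nat) : Int) ∈ u ∨ ((j : Nat) : Int) ∈ l) := by
    rw [PySem.List.mem_sorted, PySem.Set.mem_union]
    simp [PySem.Set.mem_ofList]
  have hup : (((j : Nat) : Int) ∈ PySem.Set.ofList u) ↔ ((j : Nat) : Int) ∈ u := PySem.Set.mem_ofList u _
  simp only [pvVal, pvH]
  by_cases hju : ((j : Nat) : Int) ∈ u
  · simp [hju, hmem.mpr (Or.inl hju), hup.mpr hju]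
  · by_cases hjl : ((j : Nat) : Int) ∈ l
    · simp [hjl, hmem.mpr (Or.inr hjl), hup, hju]
    · have : ¬ (((j : Nat) : Int) ∈ PySem.List.sorted (PySem.Set.union (PySem.Set.ofList u) (PySem.Set.ofList l)) (fun x => x) false) := by
        rw [hmem]; tauto
      simp [hju, hjl, this]

-- ===== VERDICT (by name: the statement is the Claim_ definition above) =====
theorem gamma_converter_spec : Claim_equal_gamma_converter := by
  intro gamma upper_li lower_li _ hpre
  show gamma_converter gamma upper_li lower_li = gamma_converter_alt gamma upper_li lower_li
  exact pvMain gamma upper_li lower_li hpre.1
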